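-- pv_equiv track=rewrite | github.com/mageshyt/leetcode-solutions | exam/island.py | count_ways_to_reach_island
-- ===== SOURCE A (Python) =====
-- def count_ways_to_reach_island(N):
--     ways = [0] * (N + 1)
--     ways[1] = 1
--
--     for j in range(2, N + 1):
--         for i in range(1, j):
--             if j % i == 0:  # If i is a divisor of j
--                 ways[j] += ways[i]  # Add the number of ways to reach i to j
--
--     return ways[N]
-- ===== SOURCE B (Python) =====
-- def count_ways_to_reach_island(N):
--     # ways[j] is only ever needed at divisors of N: for a divisor d of N,
--     # every proper divisor e of d also divides N, so the recurrence closes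
--     # over the divisors of N alone.
--     divs = [d for d in range(1, N + 1) if N % d == 0]
--     ways = {1: 1}
--     for d in divs[1:]:
--         ways[d] = sum(ways[e] for e in divs if d % e == 0 and e < d)
--     return ways[N]
-- ===== Notes on version B (the rewrite author's own statement) =====
-- stated objective: faster
-- what changed: B observes that ways[j] is only needed at divisors of N, so it builds the divisor list once and runs the DP in a dict keyed by divisors only (sum over divisor pairs), instead of A's O(N^2) double loop over an array of size N
import Mathlib
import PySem

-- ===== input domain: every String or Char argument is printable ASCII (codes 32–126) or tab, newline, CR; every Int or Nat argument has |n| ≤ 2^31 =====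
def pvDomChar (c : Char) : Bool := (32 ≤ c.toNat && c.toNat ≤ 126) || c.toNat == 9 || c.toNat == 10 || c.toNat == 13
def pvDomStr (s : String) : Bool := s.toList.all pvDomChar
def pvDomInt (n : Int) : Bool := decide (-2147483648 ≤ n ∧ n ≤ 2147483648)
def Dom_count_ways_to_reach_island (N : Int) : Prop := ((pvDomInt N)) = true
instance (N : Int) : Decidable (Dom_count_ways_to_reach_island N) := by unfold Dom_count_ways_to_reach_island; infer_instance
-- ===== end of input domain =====

-- B restricts the DP to the divisors of N kept in a dict (A fills an array of size N with a double loop); equivalence proved for N >= 1.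


-- ===== PORT A =====
def count_ways_to_reach_island (N : Int) : Int :=
  let ways : List Int := PySem.List.pySetD (List.replicate (N + 1).toNat 0) 1 1
  let ways := (PySem.List.pyRange 2 (N + 1) 1).foldl (fun w j =>
      (PySem.List.pyRange 1 j 1).foldl (fun w i =>
        if PySem.Int.mod j i = 0 then
          PySem.List.pySetD w j (PySem.List.pyGetD w j 0 + PySem.List.pyGetD w i 0)
        else w) w) ways
  PySem.List.pyGetD ways N 0

-- ===== PORT B =====
-- ways[e] / ways[N] are dict lookups that never miss in Source B (every key read was inserted
-- before, and N itself is the last divisor); ported as getD with default 0, exact here.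
def count_ways_to_reach_island_alt (N : Int) : Int :=
  let divs := (PySem.List.pyRange 1 (N + 1) 1).filter (fun d => PySem.Int.mod N d == 0)
  let ways : PySem.Dict Int Int := PySem.Dict.empty.insert 1 1
  let ways := (PySem.List.slice divs (some 1) none).foldl (fun w d =>
      w.insert d (((divs.filter (fun e => PySem.Int.mod d e == 0 && decide (e < d))).map
        (fun e => w.getD e 0)).sum)) ways
  ways.getD N 0

-- ===== PRECONDITION & SPEC =====
-- Pre_ excludes exactly N ≤ 0, where the Python A raises IndexError at `ways[1] = 1` (and B raises KeyError).
def Pre_count_ways_to_reach_island (N : Int) : Prop := 1 ≤ N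
instance (N : Int) : Decidable (Pre_count_ways_to_reach_island N) := by unfold Pre_count_ways_to_reach_island; infer_instance
def pvWitness_count_ways_to_reach_island : Int := (3)
def Spec_count_ways_to_reach_island (N : Int) (out : Int) : Prop := out = count_ways_to_reach_island_alt N
instance (N : Int) (out : Int) : Decidable (Spec_count_ways_to_reach_island N out) := by unfold Spec_count_ways_to_reach_island; infer_instance

-- ===== CLAIM (what is proved, stated in full; the proofs are below) =====
def Claim_equal_count_ways_to_reach_island : Prop := ∀ (N : Int), Dom_count_ways_to_reach_island N → Pre_count_ways_to_reach_island N → Spec_count_ways_to_reach_island N (count_ways_to_reach_island N)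

-- ===== LEMMAS AND PROOFS =====

-- mathematical value both programs compute: waysSpec n = #chains of proper divisors from 1 to n
def waysSpec (n : Nat) : Int :=
  if n = 1 then 1
  else ((List.range n).attach.map (fun i => if i.1 ∣ n ∧ i.1 ≠ 0 then waysSpec i.1 else 0)).sum
termination_by n
decreasing_by exact List.mem_range.mp i.2

lemma waysSpec_eq (n : Nat) (hn : n ≠ 1) :
    waysSpec n = ((List.range n).map (fun i => if i ∣ n ∧ i ≠ 0 then waysSpec i else 0)).sum := by
  rw [waysSpec]; simp [hn]

lemma sum_divisors (mn : Nat) (h : 1 ≤ mn) :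
    ((List.range mn).map (fun t => if (t + 1) ∣ (mn + 1) then waysSpec (t + 1) else 0)).sum
      = waysSpec (mn + 1) := by
  rw [waysSpec_eq (mn + 1) (by omega)]
  rw [show mn + 1 = 1 + mn from by omega, List.range_add]
  simp [List.map_map, Function.comp_def, Nat.add_comm 1]

lemma waysSpec_one : waysSpec 1 = 1 := by rw [waysSpec]; simp

lemma waysSpec_zero : waysSpec 0 = 0 := by rw [waysSpec]; simp

-- ---- A side ----

lemma foldA_inner (j : Int) :
    ∀ (m : Nat) (a : Int) (w : List Int), 1 ≤ a → a + m = j → j < (w.length : Int) →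
    ((PySem.List.pyRange a j 1).foldl (fun w i =>
        if PySem.Int.mod j i = 0 then
          PySem.List.pySetD w j (PySem.List.pyGetD w j 0 + PySem.List.pyGetD w i 0)
        else w) w).length = w.length ∧
    ∀ k : Int, 0 ≤ k →
      PySem.List.pyGetD ((PySem.List.pyRange a j 1).foldl (fun w i =>
        if PySem.Int.mod j i = 0 then
          PySem.List.pySetD w j (PySem.List.pyGetD w j 0 + PySem.List.pyGetD w i 0)
        else w) w) k 0
      = if k = j then
          PySem.List.pyGetD w j 0 +
            ((PySem.List.pyRange a j 1).map (fun i =>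
              if PySem.Int.mod j i = 0 then PySem.List.pyGetD w i 0 else 0)).sum
        else PySem.List.pyGetD w k 0 := by
  intro m
  induction m with
  | zero =>
    intro a w ha haj hlen
    rw [PySem.List.pyRange_one_eq_nil (by omega)]
    refine ⟨rfl, ?_⟩
    intro k hk
    simp only [List.foldl_nil, List.map_nil, List.sum_nil, add_zero]
    by_cases hkj : k = j
    · rw [if_pos hkj, hkj]
    · rw [if_neg hkj]
  | succ m ih =>
    intro a w ha haj hlen
    rw [PySem.List.pyRange_one_cons (by omega)]
    simp only [List.foldl_cons, List.map_cons, List.sum_cons]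
    set w1 := (if PySem.Int.mod j a = 0 then
          PySem.List.pySetD w j (PySem.List.pyGetD w j 0 + PySem.List.pyGetD w a 0)
        else w) with hw1
    have hlen1 : w1.length = w.length := by
      rw [hw1]; split
      · exact PySem.List.length_pySetD _ _ _
      · rfl
    have hread : ∀ x : Int, 0 ≤ x →
        PySem.List.pyGetD w1 x 0 =
          if x = j then PySem.List.pyGetD w j 0 +
              (if PySem.Int.mod j a = 0 then PySem.List.pyGetD w a 0 else 0)
          else PySem.List.pyGetD w x 0 := by
      intro x hx
      rw [hw1]
      by_cases hc : PySem.Int.mod j a = 0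
      · rw [if_pos hc, if_pos hc]
        rw [show j = ((j.toNat : Nat) : Int) from (Int.toNat_of_nonneg (by omega)).symm,
            show x = ((x.toNat : Nat) : Int) from (Int.toNat_of_nonneg hx).symm,
            PySem.List.pyGetD_pySetD_natCast _ _ _ _ _ (by omega)]
        by_cases hxj : x = j
        · rw [if_pos (by omega), if_pos (by omega)]
        · rw [if_neg (by omega), if_neg (by omega)]
      · rw [if_neg hc, if_neg hc]
        split <;> simp_all
    obtain ⟨ihlen, ihget⟩ := ih (a + 1) w1 (by omega) (by omega) (by rw [hlen1]; exact hlen)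
    refine ⟨ihlen.trans hlen1, ?_⟩
    intro k hk
    rw [ihget k hk]
    have hmap : (PySem.List.pyRange (a + 1) j 1).map (fun i =>
          if PySem.Int.mod j i = 0 then PySem.List.pyGetD w1 i 0 else 0)
        = (PySem.List.pyRange (a + 1) j 1).map (fun i =>
          if PySem.Int.mod j i = 0 then PySem.List.pyGetD w i 0 else 0) := by
      apply List.map_congr_left
      intro i hi
      rw [PySem.List.mem_pyRange_one] at hi
      rw [hread i (by omega), if_neg (show i ≠ j by omega)]
    by_cases hkj : k = j
    · subst hkj
      rw [if_pos rfl, if_pos rfl, hmap, hread k (by omega), if_pos rfl]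
      ring
    · rw [if_neg hkj, if_neg hkj, hread k hk, if_neg hkj]

lemma foldA_outer (n : Nat) :
    ∀ (cnt : Nat) (m : Int) (w : List Int), 1 ≤ m → m ≤ (n : Int) → ((n : Int) - m).toNat ≤ cnt →
    w.length = n + 1 →
    (∀ k : Int, 0 ≤ k → PySem.List.pyGetD w k 0 = if k ≤ m then waysSpec k.toNat else 0) →
    ∀ k : Int, 0 ≤ k →
      PySem.List.pyGetD ((PySem.List.pyRange (m + 1) ((n : Int) + 1) 1).foldl (fun w j =>
        (PySem.List.pyRange 1 j 1).foldl (fun w i =>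
          if PySem.Int.mod j i = 0 then
            PySem.List.pySetD w j (PySem.List.pyGetD w j 0 + PySem.List.pyGetD w i 0)
          else w) w) w) k 0
      = if k ≤ (n : Int) then waysSpec k.toNat else 0 := by
  intro cnt
  induction cnt with
  | zero =>
    intro m w hm hmn hcnt hlen hinv
    rw [PySem.List.pyRange_one_eq_nil (by omega)]
    intro k hk
    rw [List.foldl_nil, hinv k hk, show m = (n : Int) from by omega]
  | succ cnt ih =>
    intro m w hm hmn hcnt hlen hinv
    by_cases hend : m = (n : Int)
    · rw [PySem.List.pyRange_one_eq_nil (by omega)]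
      intro k hk
      rw [List.foldl_nil, hinv k hk, hend]
    · rw [PySem.List.pyRange_one_cons (by omega)]
      simp only [List.foldl_cons]
      obtain ⟨ilen, iget⟩ := foldA_inner (m + 1) m.toNat 1 w (by omega) (by omega)
        (by rw [hlen]; push_cast; omega)
      set R1 := (PySem.List.pyRange 1 (m + 1) 1).foldl (fun w i =>
          if PySem.Int.mod (m + 1) i = 0 then
            PySem.List.pySetD w (m + 1) (PySem.List.pyGetD w (m + 1) 0 + PySem.List.pyGetD w i 0)
          else w) w with hR1
      have hSig : ((PySem.List.pyRange 1 (m + 1) 1).map (fun i =>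
            if PySem.Int.mod (m + 1) i = 0 then PySem.List.pyGetD w i 0 else 0)).sum
          = waysSpec (m + 1).toNat := by
        have hstep1 : ((PySem.List.pyRange 1 (m + 1) 1).map (fun i =>
              if PySem.Int.mod (m + 1) i = 0 then PySem.List.pyGetD w i 0 else 0)).sum
            = ((PySem.List.pyRange 1 (m + 1) 1).map (fun i =>
              if PySem.Int.mod (m + 1) i = 0 then waysSpec i.toNat else 0)).sum := by
          apply congrArg
          apply List.map_congr_left
          intro i hi
          rw [PySem.List.mem_pyRange_one] at hi
          rw [hinv i (by omega), if_pos (show i ≤ m by omega)]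
        rw [hstep1, PySem.List.pyRange_one, List.map_map,
            show ((m + 1) - 1).toNat = m.toNat from by omega,
            show (m + 1).toNat = m.toNat + 1 from by omega,
            ← sum_divisors m.toNat (by omega)]
        apply congrArg
        apply List.map_congr_left
        intro t _
        simp only [Function.comp_apply]
        have hcast : (1 + (t : Int)) = ((t + 1 : Nat) : Int) := by push_cast; ring
        have hm1 : (m + 1) = ((m.toNat + 1 : Nat) : Int) := by omega
        have hdvd : (PySem.Int.mod (m + 1) (1 + (t : Int)) = 0) ↔ ((t + 1) ∣ (m.toNat + 1)) := by
          rw [PySem.Int.mod_eq_zero_iff_dvd, hcast, hm1, Int.natCast_dvd_natCast]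
        by_cases hd : (t + 1) ∣ (m.toNat + 1)
        · rw [if_pos (hdvd.mpr hd), if_pos hd, hcast, Int.toNat_natCast]
        · rw [if_neg (fun hc => hd (hdvd.mp hc)), if_neg hd]
      have hinv1 : ∀ k : Int, 0 ≤ k →
          PySem.List.pyGetD R1 k 0 = if k ≤ m + 1 then waysSpec k.toNat else 0 := by
        intro k hk
        rw [iget k hk]
        by_cases hkm : k = m + 1
        · rw [if_pos hkm, hinv (m + 1) (by omega), if_neg (by omega), zero_add, hSig,
            if_pos (by omega), hkm]
        · rw [if_neg hkm, hinv k hk]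
          by_cases hkle : k ≤ m
          · rw [if_pos hkle, if_pos (by omega)]
          · rw [if_neg hkle, if_neg (by omega)]
      have := ih (m + 1) R1 (by omega) (by omega) (by omega) (by rw [ilen, hlen]) hinv1
      exact this

lemma init_getD (n : Nat) (hn : 1 ≤ n) (k : Int) (hk : 0 ≤ k) :
    PySem.List.pyGetD (PySem.List.pySetD (List.replicate (n + 1) (0 : Int)) 1 1) k 0
      = if k = 1 then 1 else 0 := by
  rw [PySem.List.pySetD_of_nonneg _ _ (by omega)]
  rw [show k = ((k.toNat : Nat) : Int) from (Int.toNat_of_nonneg hk).symm]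
  rw [PySem.List.pyGetD_natCast]
  obtain ⟨n', rfl⟩ : ∃ n', n = n' + 1 := ⟨n - 1, by omega⟩
  simp only [List.replicate_succ, Int.toNat_one, List.set_cons_succ, List.set_cons_zero]
  rcases htk : k.toNat with _ | _ | t
  · simp
  · simp
  · simp [List.getD]
    omega

lemma len_init (n : Nat) :
    (PySem.List.pySetD (List.replicate (n + 1) (0:Int)) 1 1).length = n + 1 := by
  rw [PySem.List.length_pySetD, List.length_replicate]

theorem a_eq_spec (N : Int) (h : 1 ≤ N) : count_ways_to_reach_island N = waysSpec N.toNat := by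
  obtain ⟨n, hn, rfl⟩ : ∃ n : Nat, 1 ≤ n ∧ N = (n : Int) := ⟨N.toNat, by omega, by omega⟩
  simp only [count_ways_to_reach_island]
  rw [show ((n : Int) + 1).toNat = n + 1 from by omega]
  have hinv0 : ∀ k : Int, 0 ≤ k →
      PySem.List.pyGetD (PySem.List.pySetD (List.replicate (n + 1) (0:Int)) 1 1) k 0
        = if k ≤ 1 then waysSpec k.toNat else 0 := by
    intro k hk
    rw [init_getD n hn k hk]
    by_cases h1 : k = 1
    · rw [if_pos h1, if_pos (by omega), show k.toNat = 1 from by omega, waysSpec_one]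
    · rw [if_neg h1]
      by_cases h0 : k = 0
      · rw [if_pos (by omega), show k.toNat = 0 from by omega, waysSpec_zero]
      · rw [if_neg (by omega)]
  have hmain := foldA_outer n (n - 1) 1 _ le_rfl (by omega) (by omega) (len_init n) hinv0
    (n : Int) (by omega)
  rw [if_pos le_rfl] at hmain
  rw [show (2 : Int) = 1 + 1 from by norm_num]
  rw [Int.toNat_natCast]
  exact hmain

-- ---- B side ----

lemma sum_map_filter_eq {α : Type} (p : α → Bool) (f : α → Int) (l : List α) :
    ((l.filter p).map f).sum = (l.map (fun x => if p x then f x else 0)).sum := by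
  induction l with
  | nil => rfl
  | cons x t ih =>
    by_cases hx : p x
    · rw [List.filter_cons_of_pos hx, List.map_cons, List.sum_cons, ih,
        List.map_cons, List.sum_cons, if_pos hx]
    · rw [List.filter_cons_of_neg hx, ih, List.map_cons, List.sum_cons,
        if_neg hx, zero_add]

-- Σ_{1 ≤ e < d, e ∣ d} waysSpec e = waysSpec d (the recurrence both programs implement)
lemma pyRange_divisor_sum (d : Int) (hd : 2 ≤ d) :
    ((PySem.List.pyRange 1 d 1).map (fun e =>
        if PySem.Int.mod d e == 0 then waysSpec e.toNat else 0)).sum = waysSpec d.toNat := by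
  obtain ⟨n, hn, rfl⟩ : ∃ n : Nat, 1 ≤ n ∧ d = ((n : Int) + 1) := ⟨(d - 1).toNat, by omega, by omega⟩
  rw [PySem.List.pyRange_one, List.map_map,
      show (((n : Int) + 1) - 1).toNat = n from by omega,
      show (((n : Int) + 1)).toNat = n + 1 from by omega,
      ← sum_divisors n (by omega)]
  apply congrArg
  apply List.map_congr_left
  intro t _
  simp only [Function.comp_apply]
  have hcast : (1 + (t : Int)) = ((t + 1 : Nat) : Int) := by push_cast; ring
  have hdvd : (PySem.Int.mod ((n : Int) + 1) (1 + (t : Int)) = 0) ↔ ((t + 1) ∣ (n + 1)) := by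
    rw [PySem.Int.mod_eq_zero_iff_dvd, hcast, show ((n : Int) + 1) = ((n + 1 : Nat) : Int) from by omega,
      Int.natCast_dvd_natCast]
  by_cases hdv : (t + 1) ∣ (n + 1)
  · rw [if_pos (by simpa using hdvd.mpr hdv), if_pos hdv, hcast, Int.toNat_natCast]
  · rw [if_neg (by simpa using fun hc => hdv (hdvd.mp hc)), if_neg hdv]

-- invariant of B's fold over the tail of the divisor list: the dict holds waysSpec on processed divisors
lemma foldB_main (N : Int) (D : List Int)
    (hmem : ∀ e : Int, e ∈ D ↔ 1 ≤ e ∧ e < N + 1 ∧ e ∣ N)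
    (hpair : D.Pairwise (· < ·)) :
    ∀ (l pre : List Int) (w : PySem.Dict Int Int),
      D = pre ++ l → (1 : Int) ∈ pre →
      (∀ e ∈ pre, w.getD e 0 = waysSpec e.toNat) →
      ∀ k ∈ D,
        (l.foldl (fun w d =>
          w.insert d (((D.filter (fun e => PySem.Int.mod d e == 0 && decide (e < d))).map
            (fun e => w.getD e 0)).sum)) w).getD k 0 = waysSpec k.toNat := by
  intro l
  induction l with
  | nil =>
    intro pre w hD h1 hpre k hk
    rw [List.foldl_nil]
    exact hpre k (by rw [hD, List.append_nil] at hk; exact hk)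
  | cons d l' ih =>
    intro pre w hD h1 hpre k hk
    have hdD : d ∈ D := by rw [hD]; exact List.mem_append_right _ (List.mem_cons_self ..)
    obtain ⟨hd1, hdN, hdvdN⟩ := (hmem d).mp hdD
    have hsplit := List.pairwise_append.mp (hD ▸ hpair)
    have hlt_pre : ∀ e ∈ pre, e < d := fun e he => hsplit.2.2 e he d (List.mem_cons_self ..)
    have hgt_l' : ∀ y ∈ l', d < y := fun y hy => List.rel_of_pairwise_cons hsplit.2.1 hy
    have hd2 : 2 ≤ d := by have := hlt_pre 1 h1; omega
    -- the value inserted for d is waysSpec d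
    have hval : ((D.filter (fun e => PySem.Int.mod d e == 0 && decide (e < d))).map
        (fun e => w.getD e 0)).sum = waysSpec d.toNat := by
      have hin_pre : ∀ e ∈ D.filter (fun e => PySem.Int.mod d e == 0 && decide (e < d)), e ∈ pre := by
        intro e he
        obtain ⟨heD, hcond⟩ := List.mem_filter.mp he
        have helt : e < d := by
          simp only [Bool.and_eq_true, decide_eq_true_eq] at hcond
          exact hcond.2
        rw [hD] at heD
        rcases List.mem_append.mp heD with h | h
        · exact h
        · rcases List.mem_cons.mp h with rfl | h
          · omega
          · exact absurd (hgt_l' e h) (by omega)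
      have hstep1 : ((D.filter (fun e => PySem.Int.mod d e == 0 && decide (e < d))).map
            (fun e => w.getD e 0)).sum
          = ((D.filter (fun e => PySem.Int.mod d e == 0 && decide (e < d))).map
            (fun e => waysSpec e.toNat)).sum := by
        apply congrArg
        apply List.map_congr_left
        intro e he
        exact hpre e (hin_pre e he)
      -- the filtered divisor list is a permutation of the filtered range 1..d-1
      have hperm : (D.filter (fun e => PySem.Int.mod d e == 0 && decide (e < d))).Perm
          ((PySem.List.pyRange 1 d 1).filter (fun e => PySem.Int.mod d e == 0)) := by
        rw [List.perm_ext_iff_of_nodup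
          ((hpair.imp (fun h => ne_of_lt h)).filter _)
          ((PySem.List.nodup_pyRange_one 1 d).filter _)]
        intro e
        simp only [List.mem_filter, Bool.and_eq_true, decide_eq_true_eq, beq_iff_eq,
          PySem.List.mem_pyRange_one, hmem e, PySem.Int.mod_eq_zero_iff_dvd]
        constructor
        · rintro ⟨⟨he1, -, -⟩, hed, helt⟩
          exact ⟨⟨he1, helt⟩, hed⟩
        · rintro ⟨⟨he1, helt⟩, hed⟩
          exact ⟨⟨he1, by omega, hed.trans hdvdN⟩, hed, helt⟩
      rw [hstep1, (hperm.map (fun e => waysSpec e.toNat)).sum_eq,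
        sum_map_filter_eq, ← pyRange_divisor_sum d hd2]
    rw [List.foldl_cons, hval]
    -- re-establish the invariant for pre ++ [d] and recurse
    refine ih (pre ++ [d]) _ (by rw [hD]; simp) (List.mem_append_left _ h1) ?_ k hk
    intro e he
    rcases List.mem_append.mp he with h | h
    · rw [PySem.Dict.getD_insert, if_neg (by have := hlt_pre e h; omega)]
      exact hpre e h
    · rw [List.mem_singleton.mp h, PySem.Dict.getD_insert_self]

theorem b_eq_spec (N : Int) (h : 1 ≤ N) : count_ways_to_reach_island_alt N = waysSpec N.toNat := by
  simp only [count_ways_to_reach_island_alt]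
  have hdivs : (PySem.List.pyRange 1 (N + 1) 1).filter (fun d => PySem.Int.mod N d == 0)
      = (1 : Int) :: (PySem.List.pyRange 2 (N + 1) 1).filter (fun d => PySem.Int.mod N d == 0) := by
    rw [PySem.List.pyRange_one_cons (by omega), List.filter_cons_of_pos
      (by simp only [beq_iff_eq, PySem.Int.mod_eq_zero_iff_dvd]; exact one_dvd N), show (1 : Int) + 1 = 2 from by norm_num]
  rw [hdivs, PySem.List.slice_from_one]
  have hmem : ∀ e : Int, e ∈ (1 : Int) :: (PySem.List.pyRange 2 (N + 1) 1).filter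
      (fun d => PySem.Int.mod N d == 0) ↔ 1 ≤ e ∧ e < N + 1 ∧ e ∣ N := by
    intro e
    rw [← hdivs]
    simp only [List.mem_filter, PySem.List.mem_pyRange_one, beq_iff_eq,
      PySem.Int.mod_eq_zero_iff_dvd]
    tauto
  have hpair : ((1 : Int) :: (PySem.List.pyRange 2 (N + 1) 1).filter
      (fun d => PySem.Int.mod N d == 0)).Pairwise (· < ·) := by
    rw [← hdivs]
    exact (PySem.List.pairwise_lt_pyRange_one 1 (N + 1)).filter _
  have := foldB_main N _ hmem hpair
    ((PySem.List.pyRange 2 (N + 1) 1).filter (fun d => PySem.Int.mod N d == 0))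
    [1] (PySem.Dict.empty.insert 1 1) rfl (List.mem_singleton_self 1)
    (by
      intro e he
      rw [List.mem_singleton.mp he, PySem.Dict.getD_insert_self]
      exact waysSpec_one.symm)
    N ((hmem N).mpr ⟨h, by omega, dvd_rfl⟩)
  simpa using this

-- ===== VERDICT (by name: the statement is the Claim_ definition above) =====
theorem count_ways_to_reach_island_spec : Claim_equal_count_ways_to_reach_island := by
  intro N _ hPre
  unfold Spec_count_ways_to_reach_island
  rw [a_eq_spec N hPre, b_eq_spec N hPre]
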